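-- pv_equiv track=rewrite | github.com/ThomasFunk/SimpleWx | tools/swx-builder/swx-builder.py | _dialog_button_box_button_title
-- ===== SOURCE A (Python) =====
-- from typing import Any, Dict, List, Optional, Tuple
--
-- def _dialog_button_box_button_title(token: str) -> str:
--     title_map = {
--         "Ok": "Ok",
--         "Open": "Open",
--         "Save": "Save",
--         "SaveAll": "Save All",
--         "Cancel": "Cancel",
--         "Close": "Close",
--         "Discard": "Discard",
--         "Apply": "Apply",
--         "Reset": "Reset",
--         "RestoreDefaults": "Restore Defaults",
--         "Help": "Help",
--         "Yes": "Yes",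
--         "YesToAll": "Yes To All",
--         "No": "No",
--         "NoToAll": "No To All",
--         "Abort": "Abort",
--         "Retry": "Retry",
--         "Ignore": "Ignore",
--     }
--     if token in title_map:
--         return title_map[token]
--
--     parts: List[str] = []
--     for index, char in enumerate(token):
--         if index > 0 and char.isupper() and token[index - 1].islower():
--             parts.append(" ")
--         parts.append(char)
--     return "".join(parts) or token
-- ===== SOURCE B (Python) =====
-- def _dialog_button_box_button_title(token: str) -> str:
--     title_map = {
--         "Ok": "Ok",
--         "Open": "Open",
--         "Save": "Save",
--         "SaveAll": "Save All",
--         "Cancel": "Cancel",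
--         "Close": "Close",
--         "Discard": "Discard",
--         "Apply": "Apply",
--         "Reset": "Reset",
--         "RestoreDefaults": "Restore Defaults",
--         "Help": "Help",
--         "Yes": "Yes",
--         "YesToAll": "Yes To All",
--         "No": "No",
--         "NoToAll": "No To All",
--         "Abort": "Abort",
--         "Retry": "Retry",
--         "Ignore": "Ignore",
--     }
--     if token in title_map:
--         return title_map[token]
--
--     # staged: (1) find every word boundary by scanning adjacent pairs,
--     # (2) slice the token at those boundaries, (3) join the slices with spaces
--     cuts = [i + 1 for i, (a, b) in enumerate(zip(token, token[1:]))
--             if a.islower() and b.isupper()]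
--     starts = [0] + cuts
--     ends = cuts + [len(token)]
--     return " ".join(token[a:b] for a, b in zip(starts, ends))
-- ===== Notes on version B (the rewrite author's own statement) =====
-- stated objective: alternative
-- what changed: Replaces the char-by-char space-insertion loop (parts accumulator with an empty-separator join and an 'or token' fallback) by a staged slicing pipeline: first compute the word-boundary indices by scanning adjacent character pairs via zip(token, token[1:]), then cut the token into slices at those indices and join the slices with a space separator.
import Mathlib
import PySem

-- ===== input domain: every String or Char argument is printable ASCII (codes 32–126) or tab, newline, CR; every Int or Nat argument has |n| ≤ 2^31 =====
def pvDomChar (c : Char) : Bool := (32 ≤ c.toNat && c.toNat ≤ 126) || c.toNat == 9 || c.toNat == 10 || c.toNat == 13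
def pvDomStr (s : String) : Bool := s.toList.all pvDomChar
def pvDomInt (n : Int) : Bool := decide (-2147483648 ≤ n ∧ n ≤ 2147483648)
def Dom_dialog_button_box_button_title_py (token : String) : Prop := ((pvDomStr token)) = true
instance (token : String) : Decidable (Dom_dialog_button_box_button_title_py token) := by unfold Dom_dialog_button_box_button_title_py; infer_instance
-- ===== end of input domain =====

-- B replaces A's char-by-char space-insertion loop (parts accumulator, ''.join, 'or token') by a
-- staged slicing pipeline: compute the word-boundary indices from zip(token, token[1:]), then cut
-- the token into slices at those indices and ' '.join the slices (alternative algorithm, same cost).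

-- the title_map dict literal (identical in A and B)
def pvTitleMap : PySem.Dict String String := PySem.Dict.ofList
  [("Ok", "Ok"), ("Open", "Open"), ("Save", "Save"), ("SaveAll", "Save All"),
   ("Cancel", "Cancel"), ("Close", "Close"), ("Discard", "Discard"), ("Apply", "Apply"),
   ("Reset", "Reset"), ("RestoreDefaults", "Restore Defaults"), ("Help", "Help"),
   ("Yes", "Yes"), ("YesToAll", "Yes To All"), ("No", "No"), ("NoToAll", "No To All"),
   ("Abort", "Abort"), ("Retry", "Retry"), ("Ignore", "Ignore")]

-- ===== PORT A =====
-- A's for-loop over enumerate(token): parts accumulator, append " " before an upper char preceded by lower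
def pvALoop (cs : List Char) : Nat → List Char → List (List Char) → List (List Char)
  | _, [], parts => parts
  | i, c :: rest, parts =>
    let parts' := if decide (0 < i) && PySem.Chars.isupper c
                     && PySem.Chars.islower (PySem.List.pyGetD cs ((i : Int) - 1) ' ')
                  then parts ++ [[' ']] else parts
    pvALoop cs (i + 1) rest (parts' ++ [[c]])

def dialog_button_box_button_title_py (token : String) : String :=
  match PySem.Dict.get? pvTitleMap token with
  | some v => v
  | none =>
    let joined := PySem.Chars.join [] (pvALoop token.toList 0 token.toList [])
    if joined = [] then token else String.ofList joined   -- ''.join(parts) or token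

-- ===== PORT B =====
-- cuts = [i + 1 for i, (a, b) in enumerate(zip(token, token[1:])) if a.islower() and b.isupper()]
def pvCuts (cs : List Char) : List Int :=
  (PySem.List.enumerate (cs.zip (PySem.List.slice cs (some 1) none)) 0).filterMap
    (fun p => if PySem.Chars.islower p.2.1 && PySem.Chars.isupper p.2.2 then some (p.1 + 1) else none)

def dialog_button_box_button_title_py_alt (token : String) : String :=
  match PySem.Dict.get? pvTitleMap token with
  | some v => v
  | none =>
    let cs := token.toList
    let cuts := pvCuts cs
    let starts := (0 : Int) :: cuts                      -- starts = [0] + cuts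
    let ends := cuts ++ [(cs.length : Int)]              -- ends = cuts + [len(token)]
    -- " ".join(token[a:b] for a, b in zip(starts, ends))
    String.ofList (PySem.Chars.join [' ']
      ((starts.zip ends).map (fun p => PySem.List.slice cs (some p.1) (some p.2))))

-- ===== PRECONDITION & SPEC =====
def Spec_dialog_button_box_button_title_py (token : String) (out : String) : Prop := out = dialog_button_box_button_title_py_alt token
instance (token : String) (out : String) : Decidable (Spec_dialog_button_box_button_title_py token out) := by unfold Spec_dialog_button_box_button_title_py; infer_instance

-- ===== CLAIM (what is proved, stated in full; the proofs are below) =====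
def Claim_equal_dialog_button_box_button_title_py : Prop := ∀ (token : String), Dom_dialog_button_box_button_title_py token → Spec_dialog_button_box_button_title_py token (dialog_button_box_button_title_py token)

-- ===== LEMMAS AND PROOFS =====

-- the boundary predicate both programs test: position i starts a new word
def pvS (cs : List Char) (i : Nat) : Bool :=
  decide (0 < i) && PySem.Chars.isupper (cs.getD i ' ') && PySem.Chars.islower (cs.getD (i-1) ' ')

-- reference semantics: emit a space before the char at index i iff pvS holds there
def pvG (cs : List Char) : Nat → List Char → List Char
  | _, [] => []
  | i, c :: r => (if pvS cs i then [' ', c] else [c]) ++ pvG cs (i+1) r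

-- pvG on the suffix starting at b, with NO boundary test at b itself (a word never starts with a space)
def pvGSkip (cs : List Char) (b : Nat) : List Char :=
  if h : b < cs.length then cs[b]'h :: pvG cs (b+1) (cs.drop (b+1)) else []

theorem pvGSkip_of_lt (cs : List Char) (b : Nat) (h : b < cs.length) :
    pvGSkip cs b = cs[b]'h :: pvG cs (b+1) (cs.drop (b+1)) := by
  unfold pvGSkip; exact dif_pos h

theorem pvGSkip_of_ge (cs : List Char) (b : Nat) (h : ¬ b < cs.length) :
    pvGSkip cs b = [] := by
  unfold pvGSkip; exact dif_neg h

-- A's emitted character stream (characterisation of pvALoop)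
def pvTail (cs : List Char) : Nat → List Char → List Char
  | _, [] => []
  | i, c :: rest =>
    (if decide (0 < i) && PySem.Chars.isupper c
        && PySem.Chars.islower (PySem.List.pyGetD cs ((i : Int) - 1) ' ')
     then [' ', c] else [c]) ++ pvTail cs (i + 1) rest

theorem pvS_lt_length {cs : List Char} {j : Nat} (h : pvS cs j = true) : 0 < j ∧ j < cs.length := by
  unfold pvS at h
  simp only [Bool.and_eq_true, decide_eq_true_eq] at h
  refine ⟨h.1.1, ?_⟩
  by_contra hle
  rw [List.getD_eq_default _ _ (by omega)] at h
  have : PySem.Chars.isupper ' ' = false := by decide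
  simp [this] at h

theorem pvJoin_nil_eq_flatten (ps : List (List Char)) : PySem.Chars.join [] ps = ps.flatten := by
  induction ps with
  | nil => simp [PySem.Chars.join_nil]
  | cons a l ih =>
    cases l with
    | nil => simp [PySem.Chars.join_singleton]
    | cons b r => simp_all [PySem.Chars.join_cons_cons]

theorem pvJoin_cons_of_ne_nil (sep a : List Char) (l : List (List Char)) (h : l ≠ []) :
    PySem.Chars.join sep (a :: l) = a ++ sep ++ PySem.Chars.join sep l := by
  cases l with
  | nil => exact absurd rfl h
  | cons b r => simp [PySem.Chars.join_cons_cons]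

theorem pvALoop_spec (cs : List Char) (rest : List Char) : ∀ (i : Nat) (parts : List (List Char)),
    PySem.Chars.join [] (pvALoop cs i rest parts) = PySem.Chars.join [] parts ++ pvTail cs i rest := by
  induction rest with
  | nil => intro i parts; simp [pvALoop, pvTail]
  | cons c r ih =>
    intro i parts
    rw [pvALoop, pvTail]
    split
    all_goals rw [ih]; simp [pvJoin_nil_eq_flatten]

-- A's stream equals the reference semantics
theorem pvTail_eq_pvG (cs : List Char) (rest : List Char) : ∀ i, rest = cs.drop i →
    pvTail cs i rest = pvG cs i rest := by
  induction rest with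
  | nil => intro i _; simp [pvTail, pvG]
  | cons c r ih =>
    intro i hdrop
    have hci : cs[i]? = some c := by rw [← List.head?_drop, ← hdrop]; rfl
    obtain ⟨hilen, -⟩ := List.getElem?_eq_some_iff.mp hci
    have hgd : cs.getD i ' ' = c := by simp [List.getD_eq_getElem?_getD, hci]
    have hr : r = cs.drop (i+1) := by rw [← List.tail_drop, ← hdrop]; rfl
    rw [pvTail, pvG, ih (i+1) hr]
    congr 1
    unfold pvS
    rcases Nat.eq_zero_or_pos i with h0 | hpos
    · subst h0; simp
    · have : ((i : Int) - 1) = ((i - 1 : Nat) : Int) := by omega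
      rw [this, PySem.List.pyGetD_natCast, hgd]

-- pvG emits nothing extra when no boundary lies at or beyond i
theorem pvG_id (cs : List Char) (rest : List Char) : ∀ i, rest = cs.drop i →
    (∀ j, i ≤ j → pvS cs j = false) → pvG cs i rest = rest := by
  induction rest with
  | nil => intro i _ _; simp [pvG]
  | cons c r ih =>
    intro i hdrop hno
    have hr : r = cs.drop (i+1) := by rw [← List.tail_drop, ← hdrop]; rfl
    rw [pvG, hno i le_rfl, ih (i+1) hr (fun j hj => hno j (by omega))]
    simp

-- walking from i up to the next boundary c: pvG = the slice up to c, a space, then the rest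
theorem pvG_walk (cs : List Char) (c : Nat) (hc : pvS cs c = true) :
    ∀ d i, c - i = d → 0 < i → i ≤ c → (∀ j, i ≤ j → j < c → pvS cs j = false) →
    pvG cs i (cs.drop i) = (cs.drop i).take (c - i) ++ ' ' :: pvGSkip cs c := by
  have hclen := (pvS_lt_length hc).2
  intro d
  induction d with
  | zero =>
    intro i hd _ hic _
    rw [show i = c from by omega]
    have hdc : cs.drop c = cs[c] :: cs.drop (c+1) := (List.getElem_cons_drop hclen).symm
    rw [hdc, pvG, hc, pvGSkip_of_lt cs c hclen]
    simp
  | succ d ihd =>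
    intro i hd hipos hic hno
    have hiltc : i < c := by omega
    have hilen : i < cs.length := by omega
    have hdi : cs.drop i = cs[i] :: cs.drop (i+1) := (List.getElem_cons_drop hilen).symm
    rw [hdi, pvG, hno i le_rfl hiltc]
    rw [ihd (i+1) (by omega) (by omega) (by omega) (fun j hj hjc => hno j (by omega) hjc)]
    rw [show c - i = (c - (i+1)) + 1 from by omega, List.take_succ_cons]
    simp

-- the heart: joining the slices between consecutive bounds reproduces the reference stream
theorem pvSegJoin (cs : List Char) (cuts : List Nat) : ∀ b : Nat,
    (∀ j : Nat, j ∈ cuts ↔ (b < j ∧ pvS cs j = true)) →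
    cuts.Pairwise (· < ·) →
    PySem.Chars.join [' ']
      (((b :: cuts).zip (cuts ++ [cs.length])).map (fun p => (cs.drop p.1).take (p.2 - p.1)))
      = pvGSkip cs b := by
  induction cuts with
  | nil =>
    intro b hmem _
    have htake : (cs.drop b).take (cs.length - b) = cs.drop b := by
      apply List.take_of_length_le; simp
    simp only [List.nil_append, List.zip_cons_cons, List.zip_nil_left, List.map_cons, List.map_nil,
      PySem.Chars.join_singleton, htake]
    by_cases hb : b < cs.length
    · have hdb : cs.drop b = cs[b] :: cs.drop (b+1) := (List.getElem_cons_drop hb).symm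
      have hno : ∀ j, b + 1 ≤ j → pvS cs j = false := by
        intro j hj
        by_contra hS
        have := (hmem j).mpr ⟨by omega, by simpa using hS⟩
        simp at this
      rw [pvGSkip_of_lt cs b hb, hdb]
      congr 1
      exact (pvG_id cs _ (b+1) rfl hno).symm
    · rw [pvGSkip_of_ge cs b hb, List.drop_eq_nil_of_le (by omega)]
  | cons c rest ih =>
    intro b hmem hpw
    have hbc : b < c ∧ pvS cs c = true := (hmem c).mp (List.mem_cons_self ..)
    have hclen := (pvS_lt_length hbc.2).2
    have hpw' := (List.pairwise_cons.mp hpw)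
    have hzip : ((b :: c :: rest).zip ((c :: rest) ++ [cs.length]))
        = (b, c) :: ((c :: rest).zip (rest ++ [cs.length])) := by simp
    have hne : (((c :: rest).zip (rest ++ [cs.length])).map
        (fun p => (cs.drop p.1).take (p.2 - p.1))) ≠ [] := by
      cases rest <;> simp
    rw [hzip, List.map_cons, pvJoin_cons_of_ne_nil _ _ _ hne]
    have hmem' : ∀ j : Nat, j ∈ rest ↔ (c < j ∧ pvS cs j = true) := by
      intro j
      constructor
      · intro hj
        exact ⟨hpw'.1 j hj, ((hmem j).mp (List.mem_cons_of_mem _ hj)).2⟩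
      · rintro ⟨hcj, hS⟩
        have : j ∈ c :: rest := (hmem j).mpr ⟨by omega, hS⟩
        rcases List.mem_cons.mp this with h | h
        · omega
        · exact h
    rw [ih c hmem' hpw'.2]
    have hblen : b < cs.length := by omega
    have hdb : cs.drop b = cs[b] :: cs.drop (b+1) := (List.getElem_cons_drop hblen).symm
    have hno : ∀ j, b + 1 ≤ j → j < c → pvS cs j = false := by
      intro j hj hjc
      by_contra hS
      have : j ∈ c :: rest := (hmem j).mpr ⟨by omega, by simpa using hS⟩
      rcases List.mem_cons.mp this with h | h
      · omega
      · have := hpw'.1 j h; omega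
    have hwalk := pvG_walk cs c hbc.2 (c - (b+1)) (b+1) rfl (by omega) (by omega) hno
    rw [pvGSkip_of_lt cs b hblen, hwalk, hdb,
        show c - b = (c - (b+1)) + 1 from by omega, List.take_succ_cons]
    simp

-- the natural-number form of B's cuts list
def pvNatCuts (cs : List Char) : List Nat :=
  (List.range (cs.length - 1)).filterMap
    (fun k => if PySem.Chars.islower (cs.getD k ' ') && PySem.Chars.isupper (cs.getD (k+1) ' ')
              then some (k+1) else none)

theorem pvCuts_eq (cs : List Char) : pvCuts cs = (pvNatCuts cs).map (fun j : Nat => (j : Int)) := by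
  unfold pvCuts pvNatCuts
  rw [PySem.List.slice_from_one,
      PySem.List.enumerate_eq_map_pyRange (cs.zip cs.tail) ((' ', ' ') : Char × Char),
      List.filterMap_map, PySem.List.pyRange_one, List.filterMap_map]
  have hlen : (cs.zip cs.tail).length = cs.length - 1 := by
    simp [List.length_zip, List.length_tail]
  rw [PySem.List.len_eq, hlen,
      show ((cs.length - 1 : Nat) : Int) - 0 = ((cs.length - 1 : Nat) : Int) from by ring,
      Int.toNat_natCast, List.map_filterMap]
  apply List.filterMap_congr
  intro k hk
  have hk' : k < cs.length - 1 := List.mem_range.mp hk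
  have hz : PySem.List.pyGetD (cs.zip cs.tail) ((0 : Int) + (k : Int)) (' ', ' ')
      = (cs.getD k ' ', cs.getD (k+1) ' ') := by
    rw [show (0 : Int) + (k : Int) = ((k : Nat) : Int) from by ring, PySem.List.pyGetD_natCast]
    have hkz : k < (cs.zip cs.tail).length := by omega
    rw [List.getD_eq_getElem _ _ hkz, List.getElem_zip,
        List.getD_eq_getElem _ _ (by omega), List.getD_eq_getElem _ _ (by omega)]
    congr 1
    rw [List.getElem_tail]
  simp only [Function.comp_apply, hz]
  by_cases hcond : (PySem.Chars.islower (cs.getD k ' ')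
      && PySem.Chars.isupper (cs.getD (k+1) ' ')) = true
  · simp only [hcond, if_true, Option.map_some]
    congr 1
    push_cast
    ring
  · simp only [Bool.not_eq_true] at hcond
    simp only [hcond, Bool.false_eq_true, if_false, Option.map_none]

theorem pvMem_natCuts (cs : List Char) (j : Nat) :
    j ∈ pvNatCuts cs ↔ (0 < j ∧ pvS cs j = true) := by
  unfold pvNatCuts
  simp only [List.mem_filterMap, List.mem_range]
  constructor
  · rintro ⟨k, hk, hsome⟩
    split at hsome
    · rename_i hcond
      simp only [Option.some_inj] at hsome
      subst hsome
      simp only [Bool.and_eq_true] at hcond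
      refine ⟨by omega, ?_⟩
      unfold pvS
      rw [show k + 1 - 1 = k from by omega, hcond.1, hcond.2]
      simp
    · simp at hsome
  · rintro ⟨hj, hS⟩
    have hlt := (pvS_lt_length hS).2
    refine ⟨j - 1, by omega, ?_⟩
    unfold pvS at hS
    simp only [Bool.and_eq_true, decide_eq_true_eq] at hS
    rw [show j - 1 + 1 = j from by omega, hS.1.2, hS.2]
    simp

theorem pvNatCuts_pairwise (cs : List Char) : (pvNatCuts cs).Pairwise (· < ·) := by
  unfold pvNatCuts
  refine List.Pairwise.filterMap _ (fun a b hab x hx y hy => ?_) List.pairwise_lt_range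
  have hx' : x = a + 1 := by split at hx <;> simp_all
  have hy' : y = b + 1 := by split at hy <;> simp_all
  omega

-- B's joined slices equal the reference stream
theorem pvB_eq_gskip (cs : List Char) :
    PySem.Chars.join [' ']
      ((((0 : Int) :: pvCuts cs).zip (pvCuts cs ++ [(cs.length : Int)])).map
        (fun p => PySem.List.slice cs (some p.1) (some p.2)))
      = pvGSkip cs 0 := by
  rw [pvCuts_eq]
  rw [show ((0 : Int) :: (pvNatCuts cs).map (fun j : Nat => (j : Int)))
      = ((0 :: pvNatCuts cs).map (fun j : Nat => (j : Int))) from by simp]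
  rw [show ((pvNatCuts cs).map (fun j : Nat => (j : Int)) ++ [(cs.length : Int)])
      = ((pvNatCuts cs ++ [cs.length]).map (fun j : Nat => (j : Int))) from by simp]
  rw [List.zip_map, List.map_map]
  have hmap : ∀ p ∈ ((0 :: pvNatCuts cs).zip (pvNatCuts cs ++ [cs.length])),
      ((fun p : Int × Int => PySem.List.slice cs (some p.1) (some p.2)) ∘
        Prod.map (fun j : Nat => (j : Int)) (fun j : Nat => (j : Int))) p
      = (fun p : Nat × Nat => (cs.drop p.1).take (p.2 - p.1)) p := by
    rintro ⟨a, b⟩ _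
    simp [PySem.List.slice_natCast]
  rw [List.map_congr_left hmap]
  exact pvSegJoin cs (pvNatCuts cs) 0
    (fun j => pvMem_natCuts cs j) (pvNatCuts_pairwise cs)

-- the reference stream never starts with a space either
theorem pvG_zero_eq_gskip (cs : List Char) : pvG cs 0 cs = pvGSkip cs 0 := by
  cases cs with
  | nil => simp [pvG, pvGSkip]
  | cons c r =>
    rw [pvG, show pvS (c :: r) 0 = false from by unfold pvS; simp,
        pvGSkip_of_lt (c :: r) 0 (by simp)]
    simp

-- ===== VERDICT (by name: the statement is the Claim_ definition above) =====
theorem dialog_button_box_button_title_py_spec : Claim_equal_dialog_button_box_button_title_py := by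
  intro token _
  unfold Spec_dialog_button_box_button_title_py
  unfold dialog_button_box_button_title_py dialog_button_box_button_title_py_alt
  cases PySem.Dict.get? pvTitleMap token with
  | some v => rfl
  | none =>
    simp only
    rw [pvB_eq_gskip, pvALoop_spec, PySem.Chars.join_nil, List.nil_append,
        pvTail_eq_pvG token.toList token.toList 0 rfl, pvG_zero_eq_gskip]
    by_cases hlen : 0 < token.toList.length
    · rw [pvGSkip_of_lt _ _ hlen, if_neg (by simp)]
    · have hnil : token.toList = [] := by
        cases h : token.toList
        · rfl
        · rw [h] at hlen; simp at hlen
      rw [pvGSkip_of_ge _ _ hlen, if_pos rfl]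
      calc token = String.ofList token.toList := String.ofList_toList.symm
        _ = String.ofList [] := by rw [hnil]
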